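-- pv_equiv track=rewrite | github.com/RikuAlice01/smart-pi-LoRA | examples/raspberry_pi_zero_2w/src/core/device_id.py | validate_device_id
-- ===== SOURCE A (Python) =====
-- def validate_device_id(device_id: str) -> bool:
--     """Validate device ID format"""
--     if not device_id:
--         return False
--
--     if len(device_id) > 50:
--         return False
--
--     # Check if it contains only valid characters
--     valid_chars = set("ABCDEFGHIJKLMNOPQRSTUVWXYZ0123456789_-")
--     if not all(c in valid_chars for c in device_id.upper()):
--         return False
--
--     return True
-- ===== SOURCE B (Python) =====
-- def validate_device_id(device_id: str) -> bool:
--     """Validate device ID format via a single fused recursive pass: walk the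
--     raw string char by char, testing code-point ranges directly (no set, no
--     .upper()), aborting as soon as index 50 is reached."""
--     def go(i: int) -> bool:
--         if i == len(device_id):
--             return True
--         if i == 50:
--             return False
--         c = device_id[i]
--         if not ('A' <= c <= 'Z' or 'a' <= c <= 'z' or
--                 '0' <= c <= '9' or c == '_' or c == '-'):
--             return False
--         return go(i + 1)
--     return device_id != "" and go(0)
-- ===== Notes on version B (the rewrite author's own statement) =====
-- stated objective: alternative
-- what changed: Replaces the guard-then-set-build-then-all() staged scan over the uppercased copy with one fused recursive pass over the raw string that tests code-point ranges ('A'-'Z', 'a'-'z', '0'-'9', '_', '-') directly and short-circuits the moment index 50 is reached, so no uppercased copy and no character set are ever built.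
import Mathlib
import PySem

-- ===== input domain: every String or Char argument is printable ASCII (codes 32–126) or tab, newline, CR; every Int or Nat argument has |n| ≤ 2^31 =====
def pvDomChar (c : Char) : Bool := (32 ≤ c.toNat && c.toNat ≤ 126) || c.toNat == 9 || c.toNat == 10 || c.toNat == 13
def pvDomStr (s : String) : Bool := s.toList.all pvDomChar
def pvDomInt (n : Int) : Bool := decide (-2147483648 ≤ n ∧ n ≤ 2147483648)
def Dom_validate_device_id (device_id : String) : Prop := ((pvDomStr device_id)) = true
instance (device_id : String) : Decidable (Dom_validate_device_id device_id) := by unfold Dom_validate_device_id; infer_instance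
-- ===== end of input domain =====

-- B replaces A's staged guards + set-build + all() scan over an uppercased copy by one fused
-- recursive pass over the raw string, testing code-point ranges and stopping at index 50 — alternative, not faster.

-- ===== PORT A =====
-- valid_chars = set("ABCDEFGHIJKLMNOPQRSTUVWXYZ0123456789_-")
def pvValidSet : PySem.Set Char :=
  PySem.Set.ofList "ABCDEFGHIJKLMNOPQRSTUVWXYZ0123456789_-".toList

def validate_device_id (device_id : String) : Bool :=
  if device_id = "" then false
  else if PySem.Str.len device_id > 50 then false
  else if ¬ ((PySem.Str.upper device_id).toList.all (fun c => PySem.Set.contains pvValidSet c)) then false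
  else true

-- ===== PORT B =====
-- the range test on one raw character: 'A'<=c<='Z' or 'a'<=c<='z' or '0'<=c<='9' or c=='_' or c=='-'
def pvRangeOk (c : Char) : Bool :=
  ('A' ≤ c && c ≤ 'Z') || ('a' ≤ c && c ≤ 'z') || ('0' ≤ c && c ≤ '9') || c == '_' || c == '-'

-- the inner recursive go(i): the untraversed suffix stands for the index reaching len(device_id)
def pvGo : List Char → Nat → Bool
  | [], _ => true
  | c :: rest, i =>
    if i == 50 then false
    else if !(pvRangeOk c) then false
    else pvGo rest (i + 1)

def validate_device_id_alt (device_id : String) : Bool :=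
  !(device_id == "") && pvGo device_id.toList 0

-- ===== PRECONDITION & SPEC =====
def Spec_validate_device_id (device_id : String) (out : Bool) : Prop := out = validate_device_id_alt device_id
instance (device_id : String) (out : Bool) : Decidable (Spec_validate_device_id device_id out) := by unfold Spec_validate_device_id; infer_instance

-- ===== CLAIM (what is proved, stated in full; the proofs are below) =====
def Claim_equal_validate_device_id : Prop := ∀ (device_id : String), Dom_validate_device_id device_id → Spec_validate_device_id device_id (validate_device_id device_id)

-- ===== LEMMAS AND PROOFS =====

-- on domain characters, A's membership test after upper() agrees with B's raw range test
set_option maxRecDepth 20000 in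
theorem rangeOk_eq_contains_upper (c : Char) (h : pvDomChar c = true) :
    PySem.Set.contains pvValidSet (PySem.Chars.upperChar c) = pvRangeOk c := by
  have hle : c.toNat ≤ 126 := by
    simp only [pvDomChar, Bool.or_eq_true, Bool.and_eq_true, decide_eq_true_eq, beq_iff_eq] at h
    omega
  have key : ∀ n ∈ List.range 127,
      PySem.Set.contains pvValidSet (PySem.Chars.upperChar (Char.ofNat n)) = pvRangeOk (Char.ofNat n) := by
    decide
  have := key c.toNat (List.mem_range.mpr (by omega))
  simpa [Char.ofNat_toNat] using this

-- characterisation of B's loop: below the 50 cut-off it is the length bound plus the per-char test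
theorem pvGo_eq (cs : List Char) : ∀ i : Nat, i ≤ 50 →
    pvGo cs i = (decide (i + cs.length ≤ 50) && cs.all pvRangeOk) := by
  induction cs with
  | nil => intro i hi; simpa [pvGo] using hi
  | cons c rest ih =>
    intro i hi
    by_cases h50 : i = 50
    · subst h50
      simp [pvGo, show ¬ (50 + (rest.length + 1) ≤ 50) by omega]
    · rw [pvGo, if_neg (by simpa using h50)]
      cases hc : pvRangeOk c with
      | false => simp [hc]
      | true =>
        simp only [Bool.not_true, Bool.false_eq_true, if_false]
        rw [ih (i + 1) (by omega)]
        simp only [List.all_cons, hc, Bool.true_and, List.length_cons]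
        congr 1
        simp only [decide_eq_decide]
        omega

theorem validate_device_id_spec : Claim_equal_validate_device_id := by
  intro s hdom
  unfold Spec_validate_device_id validate_device_id validate_device_id_alt
  have hdc : ∀ c ∈ s.toList, pvDomChar c = true := by
    have := hdom
    simp only [Dom_validate_device_id, pvDomStr, List.all_eq_true] at this
    exact this
  -- A's all-over-upper equals all pvRangeOk on the raw chars (Dom)
  have hall : (PySem.Str.upper s).toList.all (fun c => PySem.Set.contains pvValidSet c)
      = s.toList.all pvRangeOk := by
    rw [PySem.Str.toList_upper]
    show (PySem.Chars.upper s.toList).all _ = _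
    rw [show PySem.Chars.upper = List.map PySem.Chars.upperChar from rfl, List.all_map]
    rw [Bool.eq_iff_iff]
    simp only [List.all_eq_true, Function.comp_apply]
    constructor
    · intro H c hc
      rw [← rangeOk_eq_contains_upper c (hdc c hc)]; exact H c hc
    · intro H c hc
      rw [rangeOk_eq_contains_upper c (hdc c hc)]; exact H c hc
  by_cases hs : s = ""
  · subst hs; decide
  · rw [if_neg hs, show (s == "") = false from beq_eq_false_iff_ne.mpr hs]
    simp only [Bool.not_false, Bool.true_and]
    rw [pvGo_eq s.toList 0 (by omega)]
    by_cases hlen : PySem.Str.len s > 50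
    · rw [if_pos hlen]
      have hd : decide (0 + s.toList.length ≤ 50) = false := by
        refine decide_eq_false ?_
        simp only [PySem.Str.len] at hlen; omega
      rw [hd, Bool.false_and]
    · rw [if_neg hlen]
      have h50 : 0 + s.toList.length ≤ 50 := by
        simp only [PySem.Str.len, not_lt] at hlen
        exact_mod_cast by omega
      rw [decide_eq_true h50, Bool.true_and, hall]
      cases h : s.toList.all pvRangeOk
      · simp
      · simp
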